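-- pv_equiv track=rewrite | github.com/aalleexxss/Tunings | code/main.py | generate_fretboard
-- ===== SOURCE A (Python) =====
-- def generate_fretboard(tuning_array):
--     fretboard_array = [[]]
--     for i in tuning_array:
--         fretboard_array[0].append(i)
--     for i in range(13):
--         temp = [(j % 12)+1 for j in fretboard_array[i]]
--         fretboard_array.append(temp)
--     return fretboard_array
-- ===== SOURCE B (Python) =====
-- def generate_fretboard(tuning_array):
--     return [list(tuning_array)] + [
--         [((x % 12) + k) % 12 + 1 for x in tuning_array] for k in range(13)
--     ]
-- ===== Notes on version B (the rewrite author's own statement) =====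
-- stated objective: simpler
-- what changed: Replaces the row-to-row recurrence (each row derived from the previous fretboard row) with a direct closed-form per-cell formula ((x % 12) + k) % 12 + 1 computed straight from the original tuning, returned as one list expression.
import Mathlib
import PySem

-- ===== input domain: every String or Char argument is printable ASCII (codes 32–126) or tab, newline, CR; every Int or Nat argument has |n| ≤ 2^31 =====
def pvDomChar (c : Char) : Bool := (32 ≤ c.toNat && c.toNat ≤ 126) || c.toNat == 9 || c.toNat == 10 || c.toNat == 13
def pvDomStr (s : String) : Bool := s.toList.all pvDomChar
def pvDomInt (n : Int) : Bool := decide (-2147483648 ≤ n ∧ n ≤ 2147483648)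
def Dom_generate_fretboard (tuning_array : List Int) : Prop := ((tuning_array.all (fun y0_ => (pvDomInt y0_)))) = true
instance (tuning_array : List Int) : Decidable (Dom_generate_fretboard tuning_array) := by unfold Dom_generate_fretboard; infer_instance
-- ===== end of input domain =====

-- B replaces A's row-to-row recurrence with a closed-form per-cell formula; objective: simpler.

-- ===== PORT A =====
-- A: row 0 built by appending each tuning element; then 13 iterations, each
-- mapping (j % 12) + 1 over fretboard_array[i] and appending the result.
def generate_fretboard (tuning_array : List Int) : List (List Int) :=
  let row0 := tuning_array.foldl (fun acc i => acc ++ [i]) ([] : List Int)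
  (PySem.List.pyRange 0 13 1).foldl
    (fun fb i => fb ++ [(PySem.List.pyGetD fb i ([] : List Int)).map
        (fun j => PySem.Int.mod j 12 + 1)])
    [row0]

-- ===== PORT B =====
-- B: first row is a copy of the tuning; row k+1 is computed directly from the
-- original tuning by ((x % 12) + k) % 12 + 1.
def generate_fretboard_alt (tuning_array : List Int) : List (List Int) :=
  tuning_array ::
    (PySem.List.pyRange 0 13 1).map
      (fun k => tuning_array.map (fun x => PySem.Int.mod (PySem.Int.mod x 12 + k) 12 + 1))

-- ===== PRECONDITION & SPEC =====
def Spec_generate_fretboard (tuning_array : List Int) (out : List (List Int)) : Prop := out = generate_fretboard_alt tuning_array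
instance (tuning_array : List Int) (out : List (List Int)) : Decidable (Spec_generate_fretboard tuning_array out) := by unfold Spec_generate_fretboard; infer_instance

-- ===== CLAIM (what is proved, stated in full; the proofs are below) =====
def Claim_equal_generate_fretboard : Prop := ∀ (tuning_array : List Int), Dom_generate_fretboard tuning_array → Spec_generate_fretboard tuning_array (generate_fretboard tuning_array)

-- ===== LEMMAS AND PROOFS =====

-- the closed-form cell of B's row k+1
def pvCell (k : Int) (x : Int) : Int := PySem.Int.mod (PySem.Int.mod x 12 + k) 12 + 1

-- A's per-row step applied to a closed-form cell advances k by one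
theorem pvCell_step (k x : Int) :
    PySem.Int.mod (pvCell k x) 12 + 1 = pvCell (k + 1) x := by
  simp only [pvCell, PySem.Int.mod_eq_emod_of_pos (a := x) (by norm_num : (0:Int) < 12),
    PySem.Int.mod_eq_emod_of_pos (b := 12) (by norm_num : (0:Int) < 12)]
  omega

-- A's step on a raw tuning value gives the k = 0 closed-form cell
theorem pvCell_base (x : Int) : PySem.Int.mod x 12 + 1 = pvCell 0 x := by
  simp only [pvCell, PySem.Int.mod_eq_emod_of_pos (b := 12) (by norm_num : (0:Int) < 12)]
  omega

theorem pvAppend_foldl (t : List Int) (acc : List Int) :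
    t.foldl (fun acc i => acc ++ [i]) acc = acc ++ t := by
  induction t generalizing acc with
  | nil => simp
  | cons x xs ih => simp [List.foldl_cons, ih]

-- invariant: after n iterations of A's loop the accumulator is exactly
-- the tuning followed by the first n closed-form rows
theorem pvBuild (t : List Int) (n : Nat) :
    (PySem.List.pyRange 0 n 1).foldl
      (fun fb i => fb ++ [(PySem.List.pyGetD fb i ([] : List Int)).map
          (fun j => PySem.Int.mod j 12 + 1)]) [t]
    = t :: (List.range n).map (fun (k : Nat) => t.map (pvCell (Int.ofNat k))) := by
  induction n with
  | zero =>
    rw [show PySem.List.pyRange 0 (((0:Nat)):Int) 1 = [] from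
      PySem.List.pyRange_one_eq_nil (by norm_num)]
    simp
  | succ n ih =>
    have hr : PySem.List.pyRange 0 ((n + 1 : Nat) : Int) 1
        = PySem.List.pyRange 0 (n : Int) 1 ++ [(n : Int)] := by
      have h : (0:Int) ≤ (n : Int) := Int.natCast_nonneg n
      have := PySem.List.pyRange_one_succ_right h
      simpa [Nat.cast_add, Nat.cast_one] using this
    rw [hr, List.foldl_append, ih]
    simp only [List.foldl_cons, List.foldl_nil]
    have hget : PySem.List.pyGetD
        (t :: (List.range n).map (fun (k : Nat) => t.map (pvCell (Int.ofNat k))))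
        ((n : Nat) : Int) ([] : List Int)
        = (t :: (List.range n).map (fun (k : Nat) => t.map (pvCell (Int.ofNat k))))[n]'(by simp) := by
      rw [PySem.List.pyGetD_natCast]
      exact List.getD_eq_getElem _ _ (by simp)
    have hlast : ((t :: (List.range n).map (fun (k : Nat) => t.map (pvCell (Int.ofNat k))))[n]'(by simp)).map
        (fun j => PySem.Int.mod j 12 + 1) = t.map (pvCell (Int.ofNat n)) := by
      cases n with
      | zero =>
        simp only [List.getElem_cons_zero]
        exact List.map_congr_left (fun x _ => pvCell_base x)
      | succ m =>
        have hidx : (t :: (List.range (m+1)).map (fun (k : Nat) => t.map (pvCell (Int.ofNat k))))[m+1]'(by simp)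
            = t.map (pvCell (Int.ofNat m)) := by
          simp [List.getElem_cons_succ]
        rw [hidx, List.map_map]
        refine List.map_congr_left (fun x _ => ?_)
        have := pvCell_step (Int.ofNat m) x
        simpa [show Int.ofNat (m+1) = Int.ofNat m + 1 from rfl] using this
    rw [hget, hlast, List.range_succ, List.map_append, List.cons_append]
    simp

-- ===== VERDICT (by name: the statement is the Claim_ definition above) =====
theorem generate_fretboard_spec : Claim_equal_generate_fretboard := by
  intro t _
  show generate_fretboard t = generate_fretboard_alt t
  unfold generate_fretboard generate_fretboard_alt
  rw [pvAppend_foldl]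
  simp only [List.nil_append]
  have h13 : (13 : Int) = ((13 : Nat) : Int) := by norm_num
  rw [h13, pvBuild]
  congr 1
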